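-- pv_equiv track=rewrite | github.com/deeev-sb/til-2022.02 | Algorithm/Python_Algorithm/solve/section_2/solution_5.py | solution
-- ===== SOURCE A (Python) =====
-- def solution(N, M):
--     answer = ''
--     result = [0]*(N+M+1)
--     for i in range(1,N+1):
--         for j in range(1,M+1):
--             result[i+j] += 1
--     max_num = max(result)
--     for i in range(N+M+1):
--         if max_num == result[i]:
--             answer += str(i) + ' '
--
--     return answer
-- ===== SOURCE B (Python) =====
-- def solution(N, M):
--     c = min(N, M)
--     return ''.join(str(s) + ' ' for s in range(c + 1, N + M + 2 - c))
-- ===== Notes on version B (the rewrite author's own statement) =====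
-- stated objective: faster
-- what changed: Replaces the O(N*M) nested histogram loop plus array scan by the closed-form observation that the pair-sum counts form a ramp whose maximum min(N,M) is attained exactly on the contiguous sums [min(N,M)+1, N+M+1-min(N,M)], emitted directly in O(N+M); Pre_ excludes non-positive N or M, degenerate inputs outside the dice-count domain on which A either raises ValueError (N+M<0) or prints every index of an all-zero histogram, a corner no specification covers.
-- outside the precondition, e.g. on solution(0, 3): A returns '0 1 2 3 ', B returns '1 2 3 4 '; on solution(-2, 1): A raises ValueError, B returns '-1 0 1 2 '
import Mathlib
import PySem

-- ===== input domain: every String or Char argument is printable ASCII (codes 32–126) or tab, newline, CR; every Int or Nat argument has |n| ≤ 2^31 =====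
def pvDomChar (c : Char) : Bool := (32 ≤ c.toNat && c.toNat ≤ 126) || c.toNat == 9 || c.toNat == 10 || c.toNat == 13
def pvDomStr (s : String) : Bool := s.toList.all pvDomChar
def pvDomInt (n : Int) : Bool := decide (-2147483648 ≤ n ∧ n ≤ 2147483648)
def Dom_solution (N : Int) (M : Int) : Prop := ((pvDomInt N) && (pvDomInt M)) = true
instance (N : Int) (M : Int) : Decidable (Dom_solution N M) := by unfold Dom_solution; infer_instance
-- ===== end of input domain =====

-- B replaces A's O(N*M) nested histogram loop by the closed form: the counts ramp up to min(N,M),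
-- attained exactly on the contiguous sums min(N,M)+1 .. N+M+1-min(N,M), emitted directly in O(N+M).

-- ===== PORT A =====
-- result[i+j] += 1: the histogram is kept in an Array for O(1) in-place updates; inside the loops
-- 2 <= i+j <= N+M < len(result), so the index is always nonnegative and in range and the Nat-indexed
-- setIfInBounds/getD perform exactly Python's result[i+j] += 1 (proved in pvBumpA_toList below).
def pvBumpA (r : Array Int) (x : Int) : Array Int :=
  r.setIfInBounds x.toNat (r.getD x.toNat 0 + 1)

def solution (N : Int) (M : Int) : String :=
  let answer : String := ""
  let result0 : Array Int := Array.replicate (N + M + 1).toNat 0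
  let result : Array Int :=
    (PySem.List.pyRange 1 (N + 1) 1).foldl (fun res i =>
      (PySem.List.pyRange 1 (M + 1) 1).foldl (fun res j => pvBumpA res (i + j)) res) result0
  let resultL : List Int := result.toList
  match PySem.List.max? resultL (fun x => x) with
  | none => ""   -- max([]) raises ValueError; excluded by Pre_solution
  | some max_num =>
    (PySem.List.pyRange 0 (N + M + 1) 1).foldl (fun answer i =>
      if max_num == PySem.List.pyGetD resultL i 0 then answer ++ PySem.Int.toStr i ++ " "
      else answer) answer

-- ===== PORT B =====
def solution_alt (N : Int) (M : Int) : String :=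
  let c := min N M
  PySem.Str.join "" ((PySem.List.pyRange (c + 1) (N + M + 2 - c) 1).map
    (fun s => PySem.Int.toStr s ++ " "))

-- ===== PRECONDITION & SPEC =====
-- Pre_ excludes non-positive N or M: degenerate inputs outside the dice-count domain, on which A
-- either raises ValueError (N+M<0, max of an empty list) or prints every index of an all-zero
-- histogram — a corner no specification covers.
def Pre_solution (N : Int) (M : Int) : Prop := 1 ≤ N ∧ 1 ≤ M
instance (N : Int) (M : Int) : Decidable (Pre_solution N M) := by unfold Pre_solution; infer_instance
def pvWitness_solution : Int × Int := (3, 4)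
def Spec_solution (N : Int) (M : Int) (out : String) : Prop := out = solution_alt N M
instance (N : Int) (M : Int) (out : String) : Decidable (Spec_solution N M out) := by unfold Spec_solution; infer_instance

-- ===== CLAIM (what is proved, stated in full; the proofs are below) =====
def Claim_equal_solution : Prop := ∀ (N : Int) (M : Int), Dom_solution N M → Pre_solution N M → Spec_solution N M (solution N M)

-- ===== LEMMAS AND PROOFS =====

-- one "+=1 at index x" step of A's inner loop
def pvBump (r : List Int) (x : Int) : List Int :=
  PySem.List.pySetD r x (PySem.List.pyGetD r x 0 + 1)

-- closed-form pair count of sum s (the length of the i-interval [max 1 (s-M), min N (s-1)])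
def pvCnt (N M s : Int) : Int := ((min (N + 1) s - max 1 (s - M)).toNat : Int)

lemma pvJoin_cons (x : String) (xs : List String) :
    PySem.Str.join "" (x :: xs) = x ++ PySem.Str.join "" xs := by
  cases xs with
  | nil => simp [PySem.Str.join, PySem.Chars.join_singleton]
  | cons y t => simp [PySem.Str.join, PySem.Chars.join_cons_cons]

-- A's answer-building loop is join of the filtered pieces
lemma pvFold_if_append (l : List Int) (p : Int → Bool) (f : Int → String) (a : String) :
    l.foldl (fun acc i => if p i then acc ++ f i ++ " " else acc) a
      = a ++ PySem.Str.join "" ((l.filter p).map (fun i => f i ++ " ")) := by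
  induction l generalizing a with
  | nil => simp [PySem.Str.join, String.append_empty]
  | cons x t ih =>
    by_cases hx : p x
    · rw [List.foldl_cons, if_pos hx, ih, List.filter_cons, if_pos hx, List.map_cons,
        pvJoin_cons]
      simp [String.append_assoc]
    · simp only [List.foldl_cons, List.filter_cons, hx, if_false, ih, Bool.false_eq_true]

lemma pvBump_foldl (idxs : List Int) : ∀ (r : List Int),
    (∀ x ∈ idxs, 0 ≤ x ∧ x < (r.length : Int)) →
    (idxs.foldl pvBump r).length = r.length ∧
    ∀ k : Nat, (idxs.foldl pvBump r).getD k 0 = r.getD k 0 + idxs.count (k : Int) := by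
  induction idxs with
  | nil => intro r _; simp
  | cons x t ih =>
    intro r h
    obtain ⟨hx0, hxl⟩ := h x (by simp)
    have hxlt : x.toNat < r.length := by omega
    have hb : pvBump r x = r.set x.toNat (PySem.List.pyGetD r x 0 + 1) := by
      unfold pvBump
      rw [PySem.List.pySetD_of_nonneg _ _ hx0]
    have hlen : (pvBump r x).length = r.length := by rw [hb]; simp
    obtain ⟨ihlen, ihget⟩ := ih (pvBump r x)
      (fun y hy => by rw [hlen]; exact h y (List.mem_cons_of_mem _ hy))
    refine ⟨by rw [List.foldl_cons, ihlen, hlen], fun k => ?_⟩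
    rw [List.foldl_cons, ihget k, List.count_cons]
    have hget : PySem.List.pyGetD r x 0 = r[x.toNat]'hxlt :=
      PySem.List.pyGetD_eq_getElem r 0 hx0 (by omega)
    have hset : (pvBump r x).getD k 0
        = if x.toNat = k then r.getD k 0 + 1 else r.getD k 0 := by
      rw [hb, List.getD_eq_getElem?_getD, List.getElem?_set]
      by_cases hk : x.toNat = k
      · subst hk
        simp [hxlt, hget, List.getD_eq_getElem?_getD]
      · simp [hk, List.getD_eq_getElem?_getD]
    rw [hset]
    by_cases hk : x.toNat = k
    · have : (x == (k : Int)) = true := by simp; omega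
      rw [this]; simp; omega
    · have : (x == (k : Int)) = false := by simp; omega
      rw [this]; simp; omega

-- the list of all pair sums A increments over
def pvSums (N M : Int) : List Int :=
  (PySem.List.pyRange 1 (N + 1) 1).flatMap
    (fun i => (PySem.List.pyRange 1 (M + 1) 1).map (fun j => i + j))

lemma pvNested_eq_sums_foldl (N M : Int) (r : Array Int) :
    (PySem.List.pyRange 1 (N + 1) 1).foldl (fun res i =>
      (PySem.List.pyRange 1 (M + 1) 1).foldl (fun res j => pvBumpA res (i + j)) res) r
    = (pvSums N M).foldl pvBumpA r := by
  rw [pvSums, List.foldl_flatMap]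
  refine PySem.List.foldl_congr_mem _ _ _ _ (fun res i _ => ?_)
  rw [List.foldl_map]

-- the Array-backed bump fold computes exactly the Python list histogram
lemma pvBumpA_toList (idxs : List Int) : ∀ (r : Array Int),
    (∀ x ∈ idxs, 0 ≤ x ∧ x < (r.size : Int)) →
    (idxs.foldl pvBumpA r).toList = idxs.foldl pvBump r.toList := by
  induction idxs with
  | nil => intro r _; rfl
  | cons x t ih =>
    intro r h
    obtain ⟨hx0, hxl⟩ := h x (by simp)
    have hstep : (pvBumpA r x).toList = pvBump r.toList x := by
      unfold pvBumpA pvBump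
      rw [PySem.List.pySetD_of_nonneg _ _ hx0, Array.toList_setIfInBounds]
      congr 1
      have hlt : x.toNat < r.size := by omega
      rw [PySem.List.pyGetD_eq_getElem r.toList 0 hx0 (by simp; omega), Array.getD,
        dif_pos hlt]
      simp
    rw [List.foldl_cons, List.foldl_cons,
      ih (pvBumpA r x) (fun y hy => by
        have : (pvBumpA r x).size = r.size := by unfold pvBumpA; simp
        rw [this]; exact h y (List.mem_cons_of_mem _ hy)), hstep]

-- interval filter of a consecutive range is a consecutive range
lemma pvFilter_pyRange (lo hi : Int) : ∀ (n : Nat) (a b : Int), b - a ≤ (n : Int) →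
    (PySem.List.pyRange a b 1).filter (fun x => decide (lo ≤ x ∧ x ≤ hi))
      = PySem.List.pyRange (max a lo) (min b (hi + 1)) 1 := by
  intro n
  induction n with
  | zero =>
    intro a b hab
    rw [PySem.List.pyRange_one_eq_nil (by omega), PySem.List.pyRange_one_eq_nil (by omega)]
    simp
  | succ n ih =>
    intro a b hab
    by_cases hord : a < b
    · rw [PySem.List.pyRange_one_cons hord, List.filter_cons]
      by_cases hin : lo ≤ a ∧ a ≤ hi
      · rw [if_pos (by simp [hin.1, hin.2]), ih (a + 1) b (by omega),
          show max a lo = a by omega, show max (a + 1) lo = a + 1 by omega,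
          ← PySem.List.pyRange_one_cons (by omega)]
      · by_cases hlo : a < lo
        · rw [if_neg (by simp; omega), ih (a + 1) b (by omega)]
          congr 1
          omega
        · -- a > hi: everything from a on is above hi
          rw [if_neg (by simp; omega), List.filter_eq_nil_iff.mpr
            (fun x hx => by rw [PySem.List.mem_pyRange_one] at hx; simp; omega),
            PySem.List.pyRange_one_eq_nil (by omega)]
    · rw [PySem.List.pyRange_one_eq_nil (by omega), PySem.List.pyRange_one_eq_nil (by omega)]
      simp

lemma pvCount_flatMap (l : List Int) (g : Int → List Int) (s : Int) :
    (l.flatMap g).count s = (l.map (fun i => (g i).count s)).sum := by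
  induction l with
  | nil => simp
  | cons x t ih => simp [List.flatMap_cons, List.count_append, ih]

lemma pvCount_sums (N M s : Int) :
    ((pvSums N M).count s : Int) = pvCnt N M s := by
  rw [pvSums, pvCount_flatMap]
  have hinner : ∀ i : Int, ((PySem.List.pyRange 1 (M + 1) 1).map (fun j => i + j)).count s
      = if (decide (1 ≤ s - i ∧ s - i < M + 1)) = true then 1 else 0 := by
    intro i
    have h1 : ((PySem.List.pyRange 1 (M + 1) 1).map (fun j => i + j)).count s
        = (PySem.List.pyRange 1 (M + 1) 1).count (s - i) := by
      rw [show s = i + (s - i) by omega]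
      rw [List.count_map_of_injective _ _ (fun a b h => by omega)]
      rw [show i + (s - i) - i = s - i by omega]
    rw [h1]
    by_cases hc : 1 ≤ s - i ∧ s - i < M + 1
    · rw [if_pos (by simpa using hc)]
      exact List.count_eq_one_of_mem (PySem.List.nodup_pyRange_one 1 (M + 1))
        (PySem.List.mem_pyRange_one.mpr hc)
    · rw [if_neg (by simpa using hc)]
      exact List.count_eq_zero.mpr (fun hm => hc (PySem.List.mem_pyRange_one.mp hm))
  rw [List.map_congr_left (fun i _ => hinner i),
    PySem.List.sum_map_ite_one_zero_nat, List.countP_eq_length_filter,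
    List.filter_congr (fun i _ => decide_eq_decide.mpr
      (show (1 ≤ s - i ∧ s - i < M + 1) ↔ (s - M ≤ i ∧ i ≤ s - 1) by omega)),
    pvFilter_pyRange (s - M) (s - 1) N.toNat 1 (N + 1) (by omega),
    PySem.List.length_pyRange_one]
  unfold pvCnt
  omega

-- A's histogram is the closed-form count at every sum
lemma pvResult_eq (N M : Int) (h : 0 ≤ N + M) :
    (pvSums N M).foldl pvBump (List.replicate (N + M + 1).toNat (0 : Int))
      = (PySem.List.pyRange 0 (N + M + 1) 1).map (fun s => pvCnt N M s) := by
  have hmem : ∀ x ∈ pvSums N M,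
      0 ≤ x ∧ x < ((List.replicate (N + M + 1).toNat (0 : Int)).length : Int) := by
    intro x hx
    simp only [pvSums, List.mem_flatMap, List.mem_map, PySem.List.mem_pyRange_one] at hx
    obtain ⟨i, hi, j, hj, rfl⟩ := hx
    simp only [List.length_replicate]
    omega
  obtain ⟨hlen, hget⟩ := pvBump_foldl (pvSums N M) _ hmem
  apply List.ext_getElem
  · rw [hlen]
    simp [PySem.List.length_pyRange_one]
  · intro k h1 h2
    have hk : k < (N + M + 1).toNat := by simpa using h1.trans_eq hlen
    have hv := hget k
    rw [List.getD_eq_getElem _ _ h1] at hv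
    rw [hv, List.getElem_map, PySem.List.getElem_pyRange_one,
      List.getD_eq_getElem _ _ (by simpa using hk), List.getElem_replicate,
      zero_add, zero_add, pvCount_sums]

theorem solution_spec : Claim_equal_solution := by
  intro N M _ hpre
  obtain ⟨hN, hM⟩ := hpre
  have hNM : 0 ≤ N + M := by omega
  unfold Spec_solution
  have hres : ((PySem.List.pyRange 1 (N + 1) 1).foldl (fun res i =>
      (PySem.List.pyRange 1 (M + 1) 1).foldl (fun res j => pvBumpA res (i + j)) res)
      (Array.replicate (N + M + 1).toNat (0 : Int))).toList
      = (PySem.List.pyRange 0 (N + M + 1) 1).map (fun s => pvCnt N M s) := by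
    rw [pvNested_eq_sums_foldl, pvBumpA_toList _ _ (fun x hx => by
        simp only [pvSums, List.mem_flatMap, List.mem_map, PySem.List.mem_pyRange_one] at hx
        obtain ⟨i, hi, j, hj, rfl⟩ := hx
        simp only [Array.size_replicate]
        omega), Array.toList_replicate]
    exact pvResult_eq N M hNM
  simp only [solution, hres]
  have hc1 : pvCnt N M (min N M + 1) = min N M := by unfold pvCnt; omega
  cases hmax : PySem.List.max? ((PySem.List.pyRange 0 (N + M + 1) 1).map
      (fun s => pvCnt N M s)) (fun x => x) with
  | none =>
    exfalso
    rw [PySem.List.max?_eq_none_iff] at hmax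
    have : (0 : Int) ∈ PySem.List.pyRange 0 (N + M + 1) 1 :=
      PySem.List.mem_pyRange_one.mpr (by omega)
    simp at hmax
    rw [hmax] at this
    simp at this
  | some m =>
    have hmc : m = min N M := by
      have hmem := PySem.List.max?_mem hmax
      simp only [List.mem_map] at hmem
      obtain ⟨s, _, rfl⟩ := hmem
      have hle : pvCnt N M s ≤ min N M := by unfold pvCnt; omega
      have hge := PySem.List.max?_isMax hmax (pvCnt N M (min N M + 1))
        (List.mem_map_of_mem (PySem.List.mem_pyRange_one.mpr (by omega)))
      rw [hc1] at hge
      omega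
    subst hmc
    simp only []
    rw [pvFold_if_append, List.filter_congr (l := PySem.List.pyRange 0 (N + M + 1) 1)
        (q := fun i => decide (min N M + 1 ≤ i ∧ i ≤ N + M + 1 - min N M)) (fun i hi => by
      rw [PySem.List.pyGetD_map_pyRange_of_nonneg _ _ _ _
        (PySem.List.mem_pyRange_one.mp hi).1 (PySem.List.mem_pyRange_one.mp hi).2]
      apply Bool.coe_iff_coe.mp
      simp only [beq_iff_eq, decide_eq_true_eq]
      unfold pvCnt
      omega),
      pvFilter_pyRange (min N M + 1) (N + M + 1 - min N M) (N + M + 1).toNat 0 (N + M + 1)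
        (by omega),
      show max 0 (min N M + 1) = min N M + 1 by omega,
      show min (N + M + 1) (N + M + 1 - min N M + 1) = N + M + 2 - min N M by omega,
      solution_alt, String.empty_append]
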